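-- pv_equiv track=rewrite | github.com/JingZe-Liang/StarPansharpeing_v1 | main/bsq_swin_encoder.py | _compatible_window_size
-- ===== SOURCE A (Python) =====
-- import math
--
-- def _positive_divisors(value: int) -> set[int]:
--     if value <= 0:
--         msg = "value for divisor calculation must be positive"
--         raise ValueError(msg)
--     divisors: set[int] = set()
--     limit = int(math.sqrt(value)) + 1
--     for candidate in range(1, limit):
--         if value % candidate == 0:
--             divisors.add(candidate)
--             divisors.add(value // candidate)
--     return divisors
--
-- def _compatible_window_size(patch_hw: tuple[int, int], desired: int) -> int:
--     common_divisors = _positive_divisors(patch_hw[0]) & _positive_divisors(patch_hw[1])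
--     if not common_divisors:
--         msg = f"No common divisors found for patch grid {patch_hw}"
--         raise ValueError(msg)
--     larger_or_equal = sorted(div for div in common_divisors if div >= desired)
--     if larger_or_equal:
--         return larger_or_equal[0]
--     return max(common_divisors)
-- ===== SOURCE B (Python) =====
-- import math
--
-- def _compatible_window_size(patch_hw, desired):
--     h, w = patch_hw
--     if h <= 0 or w <= 0:
--         raise ValueError("value for divisor calculation must be positive")
--     g = math.gcd(h, w)
--     divisors = []
--     d = 1
--     while d * d <= g:
--         if g % d == 0:
--             divisors.append(d)
--             if d != g // d:
--                 divisors.append(g // d)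
--         d += 1
--     ge = [x for x in divisors if x >= desired]
--     return min(ge) if ge else max(divisors)
-- ===== Notes on version B (the rewrite author's own statement) =====
-- stated objective: alternative
-- what changed: Instead of enumerating the divisor sets of both dimensions and intersecting them, B computes g = gcd(h, w) once and trial-divides only g up to sqrt(g) (common divisors of h and w are exactly the divisors of g), then picks the min of the divisors >= desired, else the max, with no sort.
import Mathlib
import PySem

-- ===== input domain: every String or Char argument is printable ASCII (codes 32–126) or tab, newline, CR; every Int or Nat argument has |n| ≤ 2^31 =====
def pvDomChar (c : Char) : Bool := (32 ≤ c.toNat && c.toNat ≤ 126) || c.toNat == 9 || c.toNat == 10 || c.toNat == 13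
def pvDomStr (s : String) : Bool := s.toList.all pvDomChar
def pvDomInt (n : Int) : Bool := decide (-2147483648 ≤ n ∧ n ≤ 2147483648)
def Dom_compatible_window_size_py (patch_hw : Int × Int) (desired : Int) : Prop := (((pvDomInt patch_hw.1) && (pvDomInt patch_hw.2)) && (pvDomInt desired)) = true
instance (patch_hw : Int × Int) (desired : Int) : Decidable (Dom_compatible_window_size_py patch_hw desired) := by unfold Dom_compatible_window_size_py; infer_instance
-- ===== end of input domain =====

-- B replaces the two divisor-set enumerations + set intersection of A by a single trial division
-- of gcd(h, w) and a min/max scan without sorting.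


-- ===== PORT A =====
-- _positive_divisors; for value ≤ 0 Python raises ValueError (excluded by Pre_), we return [].
-- int(math.sqrt(value)) is ported as Nat.sqrt value.toNat: exact for 0 < value ≤ 2^31 (the double
-- sqrt of an int far below 2^53 is correctly rounded, so int(math.sqrt(v)) = ⌊√v⌋ there).
def pyPositiveDivisors (value : Int) : PySem.Set Int :=
  if value ≤ 0 then PySem.Set.empty
  else
    let limit : Int := (Nat.sqrt value.toNat : Int) + 1
    (PySem.List.pyRange 1 limit 1).foldl
      (fun s c =>
        if PySem.Int.mod value c = 0 then
          PySem.Set.add (PySem.Set.add s c) (PySem.Int.floordiv value c)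
        else s)
      PySem.Set.empty

def compatible_window_size_py (patch_hw : Int × Int) (desired : Int) : Int :=
  let common : PySem.Set Int :=
    PySem.Set.inter (pyPositiveDivisors patch_hw.1) (pyPositiveDivisors patch_hw.2)
  if common = [] then 0  -- ValueError "No common divisors ..." (unreachable under Pre_)
  else
    let larger := PySem.List.sorted (common.filter (fun d => decide (desired ≤ d))) (fun x => x) false
    match larger with
    | x :: _ => x
    | [] => (PySem.List.max? common (fun x => x)).getD 0

-- ===== PORT B =====
-- the 'while d * d <= g' trial-division loop of Source B (appends d and, when distinct, g // d)
def bDivLoop (g d : Int) : List Int :=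
  if _h : d * d ≤ g then
    (if PySem.Int.mod g d = 0 then
        if d ≠ PySem.Int.floordiv g d then [d, PySem.Int.floordiv g d] else [d]
      else [])
      ++ bDivLoop g (d + 1)
  else []
termination_by (g + 1 - d).toNat
decreasing_by
  have h1 : d ≤ d * d := by rcases le_or_gt d 0 with hd | hd <;> nlinarith
  omega

def compatible_window_size_py_alt (patch_hw : Int × Int) (desired : Int) : Int :=
  if patch_hw.1 ≤ 0 ∨ patch_hw.2 ≤ 0 then 0  -- ValueError (excluded by Pre_)
  else
    let g : Int := Int.gcd patch_hw.1 patch_hw.2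
    let divisors := bDivLoop g 1
    let ge := divisors.filter (fun x => decide (desired ≤ x))
    if ge = [] then (PySem.List.max? divisors (fun x => x)).getD 0
    else (PySem.List.min? ge (fun x => x)).getD 0

-- ===== PRECONDITION & SPEC =====
-- Pre_ excludes exactly the inputs with a non-positive dimension, on which A (and B) raise
-- ValueError("value for divisor calculation must be positive").
def Pre_compatible_window_size_py (patch_hw : Int × Int) (desired : Int) : Prop :=
  0 < patch_hw.1 ∧ 0 < patch_hw.2
instance (patch_hw : Int × Int) (desired : Int) : Decidable (Pre_compatible_window_size_py patch_hw desired) := by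
  unfold Pre_compatible_window_size_py; infer_instance

def pvWitness_compatible_window_size_py : (Int × Int) × Int := ((4, 6), 2)

def Spec_compatible_window_size_py (patch_hw : Int × Int) (desired : Int) (out : Int) : Prop := out = compatible_window_size_py_alt patch_hw desired
instance (patch_hw : Int × Int) (desired : Int) (out : Int) : Decidable (Spec_compatible_window_size_py patch_hw desired out) := by unfold Spec_compatible_window_size_py; infer_instance

-- ===== CLAIM (what is proved, stated in full; the proofs are below) =====
def Claim_equal_compatible_window_size_py : Prop := ∀ (patch_hw : Int × Int) (desired : Int), Dom_compatible_window_size_py patch_hw desired → Pre_compatible_window_size_py patch_hw desired → Spec_compatible_window_size_py patch_hw desired (compatible_window_size_py patch_hw desired)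

-- ===== LEMMAS AND PROOFS =====

-- the shared arithmetic fact: the trial-division pairs (c, v // c) with c * c ≤ v cover exactly
-- the positive divisors of v
theorem trialPairs_char (v x : Int) (hv : 1 ≤ v) :
    (∃ c : Int, 1 ≤ c ∧ c * c ≤ v ∧ PySem.Int.mod v c = 0 ∧
       (x = c ∨ x = PySem.Int.floordiv v c)) ↔ (1 ≤ x ∧ x ∣ v) := by
  constructor
  · rintro ⟨c, hc1, hcc, hm, hx⟩
    have hcpos : (0:Int) < c := by omega
    obtain ⟨k, hk⟩ := (PySem.Int.mod_eq_zero_iff_dvd v c).mp hm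
    have hfl : PySem.Int.floordiv v c = k := by
      rw [PySem.Int.floordiv_eq_ediv_of_pos hcpos, hk, Int.mul_ediv_cancel_left _ (by omega)]
    have hk1 : 1 ≤ k := by nlinarith
    rcases hx with rfl | rfl
    · exact ⟨hc1, ⟨k, hk⟩⟩
    · rw [hfl]
      exact ⟨hk1, ⟨c, by rw [hk]; ring⟩⟩
  · rintro ⟨hx1, k, hk⟩
    have hk1 : 1 ≤ k := by nlinarith
    by_cases hs : x * x ≤ v
    · exact ⟨x, hx1, hs, (PySem.Int.mod_eq_zero_iff_dvd v x).mpr ⟨k, hk⟩, Or.inl rfl⟩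
    · refine ⟨k, hk1, by nlinarith,
        (PySem.Int.mod_eq_zero_iff_dvd v k).mpr ⟨x, by rw [hk]; ring⟩, Or.inr ?_⟩
      rw [PySem.Int.floordiv_eq_ediv_of_pos (by omega), hk, mul_comm,
        Int.mul_ediv_cancel_left _ (by omega)]

-- membership through A's foldl over the candidate range
theorem foldl_add_pair_mem (v : Int) (l : List Int) (s : PySem.Set Int) (x : Int) :
    x ∈ l.foldl
      (fun s c =>
        if PySem.Int.mod v c = 0 then
          PySem.Set.add (PySem.Set.add s c) (PySem.Int.floordiv v c)
        else s) s ↔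
    x ∈ s ∨ ∃ c ∈ l, PySem.Int.mod v c = 0 ∧ (x = c ∨ x = PySem.Int.floordiv v c) := by
  induction l generalizing s with
  | nil => simp
  | cons a t ih =>
    simp only [List.foldl_cons]
    by_cases ha : PySem.Int.mod v a = 0
    · rw [if_pos ha]
      rw [ih]
      simp only [PySem.Set.mem_add, List.mem_cons]
      constructor
      · rintro (((h | h) | h) | ⟨c, hc, hm, hx⟩)
        · exact Or.inl h
        · exact Or.inr ⟨a, Or.inl rfl, ha, Or.inl h⟩
        · exact Or.inr ⟨a, Or.inl rfl, ha, Or.inr h⟩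
        · exact Or.inr ⟨c, Or.inr hc, hm, hx⟩
      · rintro (h | ⟨c, rfl | hc, hm, hx⟩)
        · exact Or.inl (Or.inl (Or.inl h))
        · rcases hx with rfl | rfl
          · exact Or.inl (Or.inl (Or.inr rfl))
          · exact Or.inl (Or.inr rfl)
        · exact Or.inr ⟨c, hc, hm, hx⟩
    · rw [if_neg ha, ih]
      simp only [List.mem_cons]
      constructor
      · rintro (h | ⟨c, hc, hm, hx⟩)
        · exact Or.inl h
        · exact Or.inr ⟨c, Or.inr hc, hm, hx⟩
      · rintro (h | ⟨c, rfl | hc, hm, hx⟩)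
        · exact Or.inl h
        · exact absurd hm ha
        · exact Or.inr ⟨c, hc, hm, hx⟩

theorem mem_pyPositiveDivisors (v x : Int) (hv : 1 ≤ v) :
    x ∈ pyPositiveDivisors v ↔ (1 ≤ x ∧ x ∣ v) := by
  have hvne : ¬ v ≤ 0 := by omega
  rw [pyPositiveDivisors, if_neg hvne]
  simp only [foldl_add_pair_mem]
  rw [← trialPairs_char v x hv]
  constructor
  · rintro (h | ⟨c, hc, hm, hx⟩)
    · simp [PySem.Set.empty] at h
    · rw [PySem.List.mem_pyRange_one] at hc
      refine ⟨c, hc.1, ?_, hm, hx⟩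
      have h3 : c.toNat ≤ Nat.sqrt v.toNat := by omega
      have h5 : c.toNat * c.toNat ≤ v.toNat :=
        le_trans (Nat.mul_le_mul h3 h3) (Nat.sqrt_le v.toNat)
      have e1 : (c.toNat : Int) = c := by omega
      have e2 : (v.toNat : Int) = v := by omega
      have h6 : ((c.toNat * c.toNat : Nat) : Int) ≤ ((v.toNat : Nat) : Int) := by exact_mod_cast h5
      push_cast at h6
      rwa [e1, e2] at h6
  · rintro ⟨c, hc1, hcc, hm, hx⟩
    refine Or.inr ⟨c, ?_, hm, hx⟩
    rw [PySem.List.mem_pyRange_one]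
    refine ⟨hc1, ?_⟩
    have e1 : (c.toNat : Int) = c := by omega
    have e2 : (v.toNat : Int) = v := by omega
    have h5 : c.toNat * c.toNat ≤ v.toNat := by
      have h6 : ((c.toNat * c.toNat : Nat) : Int) ≤ (v.toNat : Int) := by
        push_cast; rw [e1, e2]; exact hcc
      exact_mod_cast h6
    have h7 : c.toNat ≤ Nat.sqrt v.toNat := Nat.le_sqrt.mpr h5
    omega

-- membership through B's while-loop (the loop is only ever entered with d ≥ 1)
theorem mem_bDivLoop (g x : Int) : ∀ d : Int, 1 ≤ d →
    (x ∈ bDivLoop g d ↔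
      ∃ c : Int, d ≤ c ∧ c * c ≤ g ∧ PySem.Int.mod g c = 0 ∧
        (x = c ∨ x = PySem.Int.floordiv g c)) := by
  intro d
  induction d using bDivLoop.induct (g := g) with
  | case1 d h ih =>
    intro _
    rw [bDivLoop, dif_pos h, List.mem_append, ih (by omega)]
    constructor
    · rintro (hx | ⟨c, hc, hcc, hm, hx⟩)
      · split_ifs at hx with h1 h2 <;>
          simp only [List.mem_cons, List.not_mem_nil] at hx
        · exact ⟨d, le_refl d, h, h1, by tauto⟩
        · exact ⟨d, le_refl d, h, h1, Or.inl (by tauto)⟩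
      · exact ⟨c, by omega, hcc, hm, hx⟩
    · rintro ⟨c, hc, hcc, hm, hx⟩
      rcases hc.eq_or_lt with rfl | hlt
      · left
        rw [if_pos hm]
        by_cases hne : d = PySem.Int.floordiv g d
        · rw [if_neg (not_not_intro hne)]
          simp only [List.mem_cons, List.not_mem_nil, or_false]
          rcases hx with rfl | rfl
          · rfl
          · exact hne.symm
        · rw [if_pos hne]
          simp only [List.mem_cons]
          tauto
      · exact Or.inr ⟨c, by omega, hcc, hm, hx⟩
  | case2 d h =>
    intro hd
    rw [bDivLoop, dif_neg h]
    simp only [List.not_mem_nil, false_iff]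
    rintro ⟨c, hc, hcc, hm, hx⟩
    nlinarith

theorem dvd_gcd_iff_both (a b x : Int) :
    (x ∣ (Int.gcd a b : Int)) ↔ (x ∣ a ∧ x ∣ b) :=
  ⟨fun h => ⟨h.trans (Int.gcd_dvd_left a b), h.trans (Int.gcd_dvd_right a b)⟩,
   fun ⟨h1, h2⟩ => Int.natAbs_dvd.mp (Int.natCast_dvd_natCast.mpr
     (Nat.dvd_gcd (Int.natAbs_dvd_natAbs.mpr h1) (Int.natAbs_dvd_natAbs.mpr h2)))⟩

-- ===== VERDICT (by name: the statement is the Claim_ definition above) =====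
theorem compatible_window_size_py_spec : Claim_equal_compatible_window_size_py := by
  intro patch_hw desired hdom hpre
  obtain ⟨h, w⟩ := patch_hw
  obtain ⟨hh, hw⟩ := hpre
  simp only at hh hw
  unfold Spec_compatible_window_size_py
  simp only [compatible_window_size_py, compatible_window_size_py_alt]
  rw [if_neg (show ¬(h ≤ 0 ∨ w ≤ 0) by omega)]
  -- notation
  have hg0 : Int.gcd h w ≠ 0 := by
    intro e; rcases Int.gcd_eq_zero_iff.mp e with ⟨e1, e2⟩; omega
  have hg1 : (1:Int) ≤ (Int.gcd h w : Int) := by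
    have := Nat.pos_of_ne_zero hg0; exact_mod_cast this
  -- same members on both sides
  have hmem : ∀ x : Int,
      x ∈ PySem.Set.inter (pyPositiveDivisors h) (pyPositiveDivisors w) ↔
      x ∈ bDivLoop (Int.gcd h w : Int) 1 := by
    intro x
    rw [PySem.Set.mem_inter, mem_pyPositiveDivisors h x (by omega),
      mem_pyPositiveDivisors w x (by omega), mem_bDivLoop _ _ 1 le_rfl,
      trialPairs_char _ _ hg1, dvd_gcd_iff_both]
    tauto
  have h1A : (1:Int) ∈ PySem.Set.inter (pyPositiveDivisors h) (pyPositiveDivisors w) := by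
    rw [PySem.Set.mem_inter, mem_pyPositiveDivisors h 1 (by omega),
      mem_pyPositiveDivisors w 1 (by omega)]
    exact ⟨⟨le_rfl, one_dvd h⟩, ⟨le_rfl, one_dvd w⟩⟩
  have hSAne : PySem.Set.inter (pyPositiveDivisors h) (pyPositiveDivisors w) ≠ [] :=
    List.ne_nil_of_mem h1A
  rw [if_neg hSAne]
  have hSBne : bDivLoop (Int.gcd h w : Int) 1 ≠ [] :=
    List.ne_nil_of_mem ((hmem 1).mp h1A)
  cases hLc : PySem.List.sorted
      ((PySem.Set.inter (pyPositiveDivisors h) (pyPositiveDivisors w)).filter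
        (fun d => decide (desired ≤ d))) (fun x => x) false with
  | nil =>
    -- no common divisor ≥ desired: both sides take the max
    have hfA : (PySem.Set.inter (pyPositiveDivisors h) (pyPositiveDivisors w)).filter
        (fun d => decide (desired ≤ d)) = [] := by
      rwa [PySem.List.sorted_eq_nil_iff] at hLc
    have hfB : (bDivLoop (Int.gcd h w : Int) 1).filter (fun x => decide (desired ≤ x)) = [] := by
      rw [List.filter_eq_nil_iff]
      intro a haB
      exact List.filter_eq_nil_iff.mp hfA a ((hmem a).mpr haB)
    rw [if_pos hfB]
    obtain ⟨mA, hmA⟩ := Option.ne_none_iff_exists'.mp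
      (fun e => hSAne ((PySem.List.max?_eq_none_iff
        (PySem.Set.inter (pyPositiveDivisors h) (pyPositiveDivisors w)) (fun x => x)).mp e))
    obtain ⟨mB, hmB⟩ := Option.ne_none_iff_exists'.mp
      (fun e => hSBne ((PySem.List.max?_eq_none_iff
        (bDivLoop (Int.gcd h w : Int) 1) (fun x => x)).mp e))
    rw [hmA, hmB]
    simp only [Option.getD_some]
    have hAmax := PySem.List.max?_isMax hmA
    have hBmax := PySem.List.max?_isMax hmB
    exact le_antisymm (hBmax mA ((hmem mA).mp (PySem.List.max?_mem hmA)))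
      (hAmax mB ((hmem mB).mpr (PySem.List.max?_mem hmB)))
  | cons x t =>
    -- x = least common divisor ≥ desired; B's min over the filtered divisors is the same
    have hxmem : x ∈ (PySem.Set.inter (pyPositiveDivisors h) (pyPositiveDivisors w)).filter
        (fun d => decide (desired ≤ d)) := by
      rw [← PySem.List.mem_sorted (key := fun x => x) (rev := false), hLc]
      exact List.mem_cons_self
    have hxmin := PySem.List.key_head_sorted_le _ _ hLc
    obtain ⟨hxA, hxd⟩ := List.mem_filter.mp hxmem
    have hxB : x ∈ (bDivLoop (Int.gcd h w : Int) 1).filter (fun x => decide (desired ≤ x)) :=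
      List.mem_filter.mpr ⟨(hmem x).mp hxA, hxd⟩
    rw [if_neg (List.ne_nil_of_mem hxB)]
    obtain ⟨mB, hmB⟩ := Option.ne_none_iff_exists'.mp
      (fun e => List.ne_nil_of_mem hxB ((PySem.List.min?_eq_none_iff
        ((bDivLoop (Int.gcd h w : Int) 1).filter (fun x => decide (desired ≤ x)))
        (fun x => x)).mp e))
    rw [hmB]
    simp only [Option.getD_some]
    have hBmin := PySem.List.min?_isMin hmB
    obtain ⟨hmBB, hmBd⟩ := List.mem_filter.mp (PySem.List.min?_mem hmB)
    have hmBA : mB ∈ (PySem.Set.inter (pyPositiveDivisors h) (pyPositiveDivisors w)).filter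
        (fun d => decide (desired ≤ d)) :=
      List.mem_filter.mpr ⟨(hmem mB).mpr hmBB, hmBd⟩
    exact le_antisymm (hxmin mB hmBA) (hBmin x hxB)
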